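-- pv_equiv track=rewrite | github.com/thepingdoctor/cloudflare-email-to-twilio-sms | streamlit-app/utils/helpers.py | sanitize_config_for_export
-- ===== SOURCE A (Python) =====
-- def sanitize_config_for_export(config_dict: dict) -> dict:
--     """
--     Sanitize configuration for safe export (remove sensitive data).
--
--     Args:
--         config_dict: Configuration dictionary
--
--     Returns:
--         Sanitized configuration
--     """
--     import copy
--     safe_config = copy.deepcopy(config_dict)
--
--     # Remove sensitive fields
--     sensitive_paths = [
--         ('twilio', 'account_sid'),
--         ('twilio', 'auth_token'),
--         ('twilio', 'phone_number'),
--         ('cloudflare', 'api_token'),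
--         ('integrations', 'notification_email')
--     ]
--
--     for path in sensitive_paths:
--         current = safe_config
--         for key in path[:-1]:
--             if key in current and isinstance(current[key], dict):
--                 current = current[key]
--             else:
--                 break
--         else:
--             # Replace with placeholder
--             if path[-1] in current:
--                 current[path[-1]] = f"<{path[-1].upper()}_PLACEHOLDER>"
--
--     return safe_config
-- ===== SOURCE B (Python) =====
-- _SENSITIVE = {
--     ('twilio', 'account_sid'),
--     ('twilio', 'auth_token'),
--     ('twilio', 'phone_number'),
--     ('cloudflare', 'api_token'),
--     ('integrations', 'notification_email'),
-- }
--
--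
-- def sanitize_config_for_export(config_dict: dict) -> dict:
--     """Sanitize configuration for safe export (remove sensitive data)."""
--     import copy
--
--     def scrub_section(section, value):
--         if not isinstance(value, dict):
--             return copy.deepcopy(value)
--         return {
--             key: (f"<{key.upper()}_PLACEHOLDER>"
--                   if (section, key) in _SENSITIVE
--                   else copy.deepcopy(val))
--             for key, val in value.items()
--         }
--
--     return {section: scrub_section(section, value)
--             for section, value in config_dict.items()}
-- ===== Notes on version B (the rewrite author's own statement) =====
-- stated objective: simpler
-- what changed: Instead of deep-copying and then mutating the copy by walking root-to-leaf once per sensitive path, B makes a single rebuilding pass over the config itself (a dict comprehension per section), deciding each leaf by membership of its (section, key) pair in a flat frozen set of sensitive pairs.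
import Mathlib
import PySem

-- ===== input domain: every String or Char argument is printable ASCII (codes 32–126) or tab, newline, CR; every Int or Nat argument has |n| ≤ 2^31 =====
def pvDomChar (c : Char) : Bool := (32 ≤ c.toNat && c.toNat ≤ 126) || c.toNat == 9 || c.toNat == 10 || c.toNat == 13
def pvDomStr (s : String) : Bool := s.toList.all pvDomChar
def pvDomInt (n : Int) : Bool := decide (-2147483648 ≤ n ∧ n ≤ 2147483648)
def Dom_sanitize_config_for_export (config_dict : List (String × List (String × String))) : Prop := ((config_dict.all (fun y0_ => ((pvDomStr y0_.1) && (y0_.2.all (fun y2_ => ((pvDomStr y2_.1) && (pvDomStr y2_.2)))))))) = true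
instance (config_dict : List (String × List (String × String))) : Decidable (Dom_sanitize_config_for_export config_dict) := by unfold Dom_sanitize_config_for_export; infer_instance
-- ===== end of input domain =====

-- B rebuilds the config in one pass (per-section comprehension consulting a flat set of
-- sensitive (section, key) pairs) instead of A's deep-copy-then-mutate per-path walks
-- (objective: simpler). Return-value equivalence only: neither Python mutates the argument.

-- ===== PORT A =====
-- A's leaf assignment: if path[-1] in current: current[path[-1]] = f"<{path[-1].upper()}_PLACEHOLDER>"
def pvLeafA (d : List (String × String)) (k : String) : List (String × String) :=
  if d.any (fun p => p.1 == k) then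
    d.map (fun p => if p.1 == k then (p.1, "<" ++ PySem.Str.upper k ++ "_PLACEHOLDER>") else p)
  else d

-- one iteration of A's 'for path in sensitive_paths' loop: walk path[:-1] (a single
-- section key; the for/else break fires when the section is absent — the isinstance
-- check is always true at this type), then patch the leaf in place
def pvStepA (cfg : List (String × List (String × String))) (path : String × String) :
    List (String × List (String × String)) :=
  if cfg.any (fun p => p.1 == path.1) then
    cfg.map (fun p => if p.1 == path.1 then (p.1, pvLeafA p.2 path.2) else p)
  else cfg

def sanitize_config_for_export (config_dict : List (String × List (String × String))) : List (String × List (String × String)) :=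
  [("twilio", "account_sid"), ("twilio", "auth_token"), ("twilio", "phone_number"),
   ("cloudflare", "api_token"), ("integrations", "notification_email")].foldl pvStepA config_dict

-- ===== PORT B =====
-- B's flat set of sensitive (section, key) pairs
def pvSensitive : List (String × String) :=
  [("twilio", "account_sid"), ("twilio", "auth_token"), ("twilio", "phone_number"),
   ("cloudflare", "api_token"), ("integrations", "notification_email")]

-- B's f"<{key.upper()}_PLACEHOLDER>"
def pvPH (k : String) : String := "<" ++ PySem.Str.upper k ++ "_PLACEHOLDER>"

-- Source B's outer comprehension over config items; scrub_section's isinstance branch is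
-- always the dict branch at this type, so each section is rebuilt by the inner
-- comprehension testing (section, key) membership in the sensitive set
def sanitize_config_for_export_alt (config_dict : List (String × List (String × String))) : List (String × List (String × String)) :=
  config_dict.map (fun p =>
    (p.1, p.2.map (fun q =>
      (q.1, if pvSensitive.any (fun e => p.1 == e.1 && q.1 == e.2) then pvPH q.1 else q.2))))

-- ===== PRECONDITION & SPEC =====
def Spec_sanitize_config_for_export (config_dict : List (String × List (String × String))) (out : List (String × List (String × String))) : Prop := out = sanitize_config_for_export_alt config_dict
instance (config_dict : List (String × List (String × String))) (out : List (String × List (String × String))) : Decidable (Spec_sanitize_config_for_export config_dict out) := by unfold Spec_sanitize_config_for_export; infer_instance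

-- ===== CLAIM (what is proved, stated in full; the proofs are below) =====
def Claim_equal_sanitize_config_for_export : Prop := ∀ (config_dict : List (String × List (String × String))), Dom_sanitize_config_for_export config_dict → Spec_sanitize_config_for_export config_dict (sanitize_config_for_export config_dict)

-- ===== LEMMAS AND PROOFS =====

-- a conditional in-place patch of keys that do not occur is the identity
theorem pv_map_id_of_not_any {α β : Type} [BEq β] (l : List α) (s : β)
    (f : α → α) (key : α → β) (h : l.any (fun p => key p == s) = false) :
    l.map (fun p => if key p == s then f p else p) = l := by
  induction l with
  | nil => rfl
  | cons p t ih =>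
    simp only [List.any_cons, Bool.or_eq_false_iff] at h
    simp [h.1, ih h.2]

-- A's membership guards are redundant: the patching map already fixes non-matching entries
theorem pvLeafA_eq (d : List (String × String)) (k : String) :
    pvLeafA d k = d.map (fun q => if q.1 == k then (q.1, pvPH q.1) else q) := by
  have hcong : d.map (fun q => if q.1 == k then (q.1, pvPH q.1) else q)
      = d.map (fun q => if q.1 == k then (q.1, "<" ++ PySem.Str.upper k ++ "_PLACEHOLDER>") else q) := by
    apply List.map_congr_left
    intro q _
    by_cases h : q.1 == k
    · have : q.1 = k := by simpa using h
      simp [pvPH, this]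
    · simp [h]
  rw [hcong]
  unfold pvLeafA
  cases hany : d.any (fun p => p.1 == k) with
  | true => simp
  | false =>
    simp only [Bool.false_eq_true, if_false]
    exact (pv_map_id_of_not_any d k _ (fun p => p.1) hany).symm

theorem pvStepA_eq (cfg : List (String × List (String × String))) (pr : String × String) :
    pvStepA cfg pr = cfg.map (fun p => if p.1 == pr.1 then (p.1, pvLeafA p.2 pr.2) else p) := by
  unfold pvStepA
  cases hany : cfg.any (fun p => p.1 == pr.1) with
  | true => simp
  | false =>
    simp only [Bool.false_eq_true, if_false]
    exact (pv_map_id_of_not_any cfg pr.1 _ (fun p => p.1) hany).symm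

-- A's fold over path pairs is a single map over the config, each entry folding its own pairs
theorem pv_foldA_map (L : List (String × String)) (cfg : List (String × List (String × String))) :
    L.foldl pvStepA cfg
      = cfg.map (fun p => (p.1, L.foldl (fun d pr => if p.1 == pr.1 then pvLeafA d pr.2 else d) p.2)) := by
  induction L generalizing cfg with
  | nil => simp
  | cons pr t ih =>
    rw [List.foldl_cons, pvStepA_eq, ih, List.map_map]
    apply List.map_congr_left
    intro p _
    by_cases h : p.1 = pr.1 <;> simp [Function.comp, h]

-- per entry: the sequence of leaf patches equals one map testing membership of the key
theorem pv_foldLeaf (L : List (String × String)) (s : String) (d : List (String × String)) :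
    L.foldl (fun d pr => if s == pr.1 then pvLeafA d pr.2 else d) d
      = d.map (fun q => (q.1, if L.any (fun e => s == e.1 && q.1 == e.2) then pvPH q.1 else q.2)) := by
  induction L generalizing d with
  | nil => simp
  | cons pr t ih =>
    rw [List.foldl_cons]
    by_cases hs : s = pr.1
    · rw [if_pos (beq_iff_eq.mpr hs), pvLeafA_eq, ih, List.map_map]
      apply List.map_congr_left
      intro q _
      by_cases hq : q.1 = pr.2 <;> simp [Function.comp, hs, hq]
    · rw [if_neg (by simpa using hs), ih]
      apply List.map_congr_left
      intro q _
      simp [hs]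

-- ===== VERDICT (by name: the statement is the Claim_ definition above) =====
theorem sanitize_config_for_export_spec : Claim_equal_sanitize_config_for_export := by
  intro cfg _
  show _ = _
  rw [sanitize_config_for_export, pv_foldA_map]
  unfold sanitize_config_for_export_alt
  apply List.map_congr_left
  intro p _
  rw [pv_foldLeaf]
  rfl
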